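-- pv_equiv track=rewrite | github.com/angelicstrike/Crypto | frequency.py | ColumnCreator
-- ===== SOURCE A (Python) =====
-- def ColumnCreator(ct, length):
--     columns = list()
--     for z in range(0,length):
--         columns.append("")
--     for x in range(0, len(ct), length):
--         for y in range(0,length):
--             if(x + y >= len(ct)):
--                 columns[y] += "0"
--             else:
--                 columns[y] += ct[x + y]
--     return columns
-- ===== SOURCE B (Python) =====
-- def ColumnCreator(ct, length):
--     rows = len(range(0, len(ct), length))
--     return [ct[y::length] + "0" * (rows - len(ct[y::length])) for y in range(length)]
-- ===== Notes on version B (the rewrite author's own statement) =====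
-- stated objective: alternative
-- what changed: Replaces the simultaneous row-by-row filling of all columns (one character appended to every column per row) by a single column-by-column pass that takes the strided slice ct[y::length] and pads it with zeros to the row count.
import Mathlib
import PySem

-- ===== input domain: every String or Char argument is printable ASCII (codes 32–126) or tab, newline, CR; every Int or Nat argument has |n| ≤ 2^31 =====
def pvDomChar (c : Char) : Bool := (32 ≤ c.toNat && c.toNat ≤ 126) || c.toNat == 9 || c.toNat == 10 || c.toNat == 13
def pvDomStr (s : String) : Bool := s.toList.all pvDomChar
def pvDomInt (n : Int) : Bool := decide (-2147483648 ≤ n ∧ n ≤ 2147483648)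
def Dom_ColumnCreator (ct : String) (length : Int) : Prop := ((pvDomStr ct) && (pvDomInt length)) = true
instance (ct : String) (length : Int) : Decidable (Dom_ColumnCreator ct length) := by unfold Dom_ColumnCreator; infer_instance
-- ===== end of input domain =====

-- B builds each column at once from a strided slice ct[y::length] padded with '0's to the row
-- count, instead of A's row-by-row filling of all columns by repeated per-cell concatenation.


-- ===== PORT A =====
-- A's two loops, verbatim, over the characters of ct (columns kept as List Char, turned into
-- String only on return).
def pvA_core (cs : List Char) (length : Int) : List (List Char) :=
  let columns : List (List Char) :=
    (PySem.List.pyRange 0 length 1).foldl (fun acc _ => acc ++ [[]]) []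
  (PySem.List.pyRange 0 (cs.length : Int) length).foldl (fun cols x =>
    (PySem.List.pyRange 0 length 1).foldl (fun cols y =>
      if (cs.length : Int) ≤ x + y then
        cols.modify y.toNat (fun c => c ++ ['0'])
      else
        cols.modify y.toNat (fun c => c ++ [(PySem.List.pyGet? cs (x + y)).getD ' '])) cols) columns

def ColumnCreator (ct : String) (length : Int) : List String :=
  (pvA_core ct.toList length).map String.ofList

-- ===== PORT B =====
-- one column of B: the strided slice cs[y::length] padded to `rows` with '0'
def pvB_col (cs : List Char) (length : Int) (rows : Nat) (y : Int) : List Char :=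
  let col := (PySem.List.slice? cs (some y) none length).getD []
  col ++ List.replicate (rows - col.length) '0'

def ColumnCreator_alt (ct : String) (length : Int) : List String :=
  let cs := ct.toList
  let rows := (PySem.List.pyRange 0 (cs.length : Int) length).length
  (PySem.List.pyRange 0 length 1).map (fun y => String.ofList (pvB_col cs length rows y))

-- ===== PRECONDITION & SPEC =====
-- Pre_ excludes exactly length = 0, where the Python A raises ValueError (range() step 0); B raises there too.
def Pre_ColumnCreator (ct : String) (length : Int) : Prop := length ≠ 0
instance (ct : String) (length : Int) : Decidable (Pre_ColumnCreator ct length) := by unfold Pre_ColumnCreator; infer_instance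
def pvWitness_ColumnCreator : String × Int := ("abcde", 2)

def Spec_ColumnCreator (ct : String) (length : Int) (out : List String) : Prop := out = ColumnCreator_alt ct length
instance (ct : String) (length : Int) (out : List String) : Decidable (Spec_ColumnCreator ct length out) := by unfold Spec_ColumnCreator; infer_instance

-- ===== CLAIM (what is proved, stated in full; the proofs are below) =====
def Claim_equal_ColumnCreator : Prop := ∀ (ct : String) (length : Int), Dom_ColumnCreator ct length → Pre_ColumnCreator ct length → Spec_ColumnCreator ct length (ColumnCreator ct length)

-- ===== LEMMAS AND PROOFS =====

-- the character A writes at flat position z of the text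
def pvPad (cs : List Char) (z : Nat) : Char := if cs.length ≤ z then '0' else cs.getD z ' '

theorem pv_init (xs : List Int) (acc : List (List Char)) :
    xs.foldl (fun a (_ : Int) => a ++ [([] : List Char)]) acc = acc ++ List.replicate xs.length [] := by
  induction xs generalizing acc with
  | nil => simp
  | cons x xs ih => simp [List.foldl_cons, ih, List.replicate_succ]

theorem pv_foldmod_len (g : Nat → List Char → List Char) (m : Nat) (cols : List (List Char)) :
    ((List.range m).foldl (fun cs k => cs.modify k (g k)) cols).length = cols.length := by
  induction m generalizing cols with
  | zero => simp
  | succ m ih => rw [List.range_succ, List.foldl_append]; simp [ih]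

theorem pv_foldmod_get (g : Nat → List Char → List Char) (m : Nat) (cols : List (List Char))
    (i : Nat) (h : i < cols.length) :
    ((List.range m).foldl (fun cs k => cs.modify k (g k)) cols)[i]? =
      some (if i < m then g i (cols[i]) else cols[i]) := by
  induction m with
  | zero => rw [List.range_zero, List.foldl_nil, if_neg (by omega), List.getElem?_eq_getElem h]
  | succ m ih =>
    rw [List.range_succ, List.foldl_append]
    simp only [List.foldl_cons, List.foldl_nil]
    rw [List.getElem?_modify, ih]
    by_cases hm : m = i
    · subst hm; simp
    · simp only [Option.map_eq_map, Option.map_some]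
      rw [if_neg hm]
      by_cases h1 : i < m
      · rw [if_pos h1, if_pos (by omega)]
      · rw [if_neg h1, if_neg (by omega)]

theorem pv_filterMap_some {α β : Type} (l : List α) (f : α → Option β) (g : α → β)
    (h : ∀ x ∈ l, f x = some (g x)) : l.filterMap f = l.map g := by
  induction l with
  | nil => simp
  | cons a l ih =>
    simp only [List.filterMap_cons, h a (by simp), List.map_cons]
    rw [ih (fun x hx => h x (by simp [hx]))]

-- k < ceil(v / L) ↔ L*k < v, for L > 0, v ≥ 0
theorem pv_ceil_iff (L v : Int) (hL : 0 < L) (_hv : 0 ≤ v) (k : Nat) :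
    k < ((v + L - 1) / L).toNat ↔ L * (k : Int) < v := by
  rw [Int.lt_toNat]
  constructor
  · intro h
    have h2 : (k : Int) + 1 ≤ (v + L - 1) / L := by omega
    have h3 := (Int.le_ediv_iff_mul_le hL).mp h2
    have h4 : ((k : Int) + 1) * L = L * k + L := by ring
    linarith
  · intro h
    have h4 : ((k : Int) + 1) * L ≤ v + L - 1 := by nlinarith
    have h2 := (Int.le_ediv_iff_mul_le hL).mpr h4
    omega

-- pyRange 0 n L for 0 < L, 0 ≤ n, as a map over List.range
theorem pv_pyRange_pos (n L : Int) (hL : 0 < L) (hn : 0 ≤ n) :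
    PySem.List.pyRange 0 n L = (List.range ((n + L - 1) / L).toNat).map (fun (k : Nat) => (0 : Int) + L * (k : Int)) := by
  rw [PySem.List.pyRange]
  rw [if_neg (by omega)]
  by_cases h0 : 0 < n
  · rw [if_pos hL, if_pos h0]; simp only [sub_zero]
  · have hn0 : n = 0 := by omega
    subst hn0
    rw [if_pos hL, if_neg (by omega)]
    have h3 : (0 + L - 1) / L = 0 := Int.ediv_eq_zero_of_lt (by omega) (by omega)
    rw [h3]; simp

-- number of rows A produces (= len(range(0, len(ct), length)) in B) for a positive length
def pvR (cs : List Char) (ℓ : Nat) : Nat := (((cs.length : Int) + ℓ - 1) / ℓ).toNat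

theorem pv_outer (cs : List Char) (ℓ : Nat) (F : List (List Char) → Nat → List (List Char))
    (hF : ∀ cols r, F cols r =
      (List.range ℓ).foldl (fun cs2 k => cs2.modify k (fun c => c ++ [pvPad cs (ℓ * r + k)])) cols)
    (t : Nat) :
    (List.range t).foldl F (List.replicate ℓ ([] : List Char)) =
      (List.range ℓ).map (fun i => (List.range t).map (fun r => pvPad cs (ℓ * r + i))) := by
  induction t with
  | zero => simp
  | succ t ih =>
    rw [List.range_succ, List.foldl_append]
    simp only [List.foldl_cons, List.foldl_nil]
    rw [ih, hF]
    apply List.ext_getElem?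
    intro i
    by_cases hi : i < ℓ
    · rw [pv_foldmod_get _ _ _ _ (by simpa using hi)]
      rw [if_pos hi]
      rw [List.getElem?_map, List.getElem?_range hi]
      simp only [List.getElem_map, List.getElem_range, Option.map_some]
      simp [List.map_append]
    · have h1 : ((List.range ℓ).foldl
          (fun cs2 k => cs2.modify k (fun c => c ++ [pvPad cs (ℓ * t + k)]))
          ((List.range ℓ).map (fun i => (List.range t).map (fun r => pvPad cs (ℓ * r + i))))).length = ℓ := by
        rw [pv_foldmod_len]; simp
      rw [List.getElem?_eq_none (by rw [h1]; omega),
          List.getElem?_eq_none (by simpa using Nat.le_of_not_lt hi)]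

theorem pv_pyrange_one_nat (ℓ : Nat) :
    PySem.List.pyRange 0 (ℓ : Int) 1 = (List.range ℓ).map (fun k => ((k : Nat) : Int)) := by
  rw [PySem.List.pyRange_one, show ((ℓ : Int) - 0).toNat = ℓ from by omega]
  simp

theorem pv_A_char (cs : List Char) (ℓ : Nat) (hℓ : 0 < ℓ) :
    pvA_core cs (ℓ : Int) =
      (List.range ℓ).map (fun i => (List.range (pvR cs ℓ)).map (fun r => pvPad cs (ℓ * r + i))) := by
  simp only [pvA_core]
  rw [pv_init, pv_pyrange_one_nat]
  rw [pv_pyRange_pos _ _ (by exact_mod_cast hℓ) (by positivity), List.foldl_map]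
  have hinit : ([] : List (List Char)) ++
      List.replicate ((List.range ℓ).map (fun k => ((k : Nat) : Int))).length ([] : List Char) =
      List.replicate ℓ ([] : List Char) := by simp
  rw [hinit]
  rw [show (((cs.length : Int) + (ℓ : Int) - 1) / (ℓ : Int)).toNat = pvR cs ℓ from rfl]
  rw [pv_outer cs ℓ _ ?_ (pvR cs ℓ)]
  intro cols r
  rw [List.foldl_map]
  have hstep : (fun (cols : List (List Char)) (k : Nat) =>
      if (cs.length : Int) ≤ (0 : Int) + (ℓ : Int) * (r : Int) + ((k : Nat) : Int) then
        cols.modify ((k : Nat) : Int).toNat (fun c => c ++ ['0'])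
      else
        cols.modify ((k : Nat) : Int).toNat
          (fun c => c ++ [(PySem.List.pyGet? cs ((0 : Int) + (ℓ : Int) * (r : Int) + ((k : Nat) : Int))).getD ' '])) =
      (fun (cs2 : List (List Char)) (k : Nat) => cs2.modify k (fun c => c ++ [pvPad cs (ℓ * r + k)])) := by
    funext cols k
    have hz : (0 : Int) + (ℓ : Int) * (r : Int) + ((k : Nat) : Int) = ((ℓ * r + k : Nat) : Int) := by
      push_cast; ring
    have ht : ((k : Nat) : Int).toNat = k := by omega
    rw [hz, ht]
    by_cases hc : cs.length ≤ ℓ * r + k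
    · rw [if_pos (by exact_mod_cast hc), pvPad, if_pos hc]
    · rw [if_neg (by exact_mod_cast hc), pvPad, if_neg hc]
      rw [PySem.List.pyGet?_natCast, List.getD_eq_getElem?_getD]
  exact congrFun (congrFun (congrArg List.foldl hstep) cols) (List.range ℓ)

theorem pv_B_col (cs : List Char) (ℓ : Nat) (hℓ : 0 < ℓ) (i : Nat) :
    pvB_col cs (ℓ : Int) (pvR cs ℓ) (i : Int) =
      (List.range (pvR cs ℓ)).map (fun r => pvPad cs (ℓ * r + i)) := by
  have hstep0 : ¬ ((ℓ : Int) = 0) := by omega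
  have hstepneg : ¬ ((ℓ : Int) < 0) := by omega
  have hsteppos : (0 : Int) < (ℓ : Int) := by exact_mod_cast hℓ
  have hi0 : ¬ ((i : Int) < 0) := by omega
  have hR : ∀ k : Nat, k < pvR cs ℓ ↔ ℓ * k < cs.length := by
    intro k
    rw [pvR, pv_ceil_iff (ℓ : Int) (cs.length : Int) hsteppos (by positivity) k]
    rw [show ((ℓ : Int) * (k : Nat) = ((ℓ * k : Nat) : Int)) from by push_cast; ring, Nat.cast_lt]
  simp only [pvB_col, PySem.List.slice?, PySem.List.sliceIndices, if_neg hstep0,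
    if_neg hstepneg, if_neg hi0, if_pos hsteppos, Option.getD_some]
  by_cases hin : i < cs.length
  · have hmin : min ((i : Nat) : Int) ((cs.length : Nat) : Int) = ((i : Nat) : Int) := by omega
    rw [hmin, if_pos (show ((i : Nat) : Int) < ((cs.length : Nat) : Int) from by exact_mod_cast hin)]
    have hceil : ∀ k : Nat,
        k < (((cs.length : Int) - (i : Int) + (ℓ : Int) - 1) / (ℓ : Int)).toNat ↔
          ℓ * k + i < cs.length := by
      intro k
      rw [show ((cs.length : Int) - (i : Int) = ((cs.length - i : Nat) : Int)) from by omega]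
      rw [pv_ceil_iff (ℓ : Int) ((cs.length - i : Nat) : Int) hsteppos (by positivity) k]
      rw [show ((ℓ : Int) * (k : Nat) = ((ℓ * k : Nat) : Int)) from by push_cast; ring, Nat.cast_lt]
      generalize ℓ * k = p
      omega
    set c : Nat := (((cs.length : Int) - (i : Int) + (ℓ : Int) - 1) / (ℓ : Int)).toNat with hc
    have hcR : c ≤ pvR cs ℓ := by
      by_contra hlt
      have hlt' : pvR cs ℓ < c := Nat.lt_of_not_le hlt
      have h1 := (hceil (pvR cs ℓ)).mp hlt'
      have h2 : ¬ (ℓ * (pvR cs ℓ) < cs.length) := fun hx => lt_irrefl _ ((hR _).mpr hx)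
      generalize ℓ * pvR cs ℓ = p at h1 h2
      omega
    have hcol : List.filterMap (fun k : Nat => cs[(((i : Nat) : Int) + (ℓ : Int) * (k : Nat)).toNat]?)
        (List.range c) = (List.range c).map (fun k => cs.getD (i + ℓ * k) ' ') := by
      apply pv_filterMap_some
      intro k hk
      rw [List.mem_range] at hk
      have hlt : i + ℓ * k < cs.length := by
        have := (hceil k).mp hk
        generalize hp : ℓ * k = p at this ⊢
        omega
      rw [show (((i : Nat) : Int) + (ℓ : Int) * (k : Nat) = ((i + ℓ * k : Nat) : Int)) from by
        push_cast; ring, Int.toNat_natCast]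
      rw [List.getElem?_eq_getElem hlt, List.getD_eq_getElem?_getD, List.getElem?_eq_getElem hlt]
      rfl
    rw [hcol]
    rw [List.length_map, List.length_range]
    rw [show pvR cs ℓ = c + (pvR cs ℓ - c) from by omega, List.range_add, List.map_append]
    congr 1
    · apply List.map_congr_left
      intro k hk
      rw [List.mem_range] at hk
      have hlt := (hceil k).mp hk
      rw [pvPad, if_neg (by generalize ℓ * k = p at hlt ⊢; omega), Nat.add_comm i (ℓ * k)]
    · rw [List.map_map]
      symm
      rw [List.eq_replicate_iff]
      refine ⟨by simp, ?_⟩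
      intro b hb
      rw [List.mem_map] at hb
      obtain ⟨j, hj, rfl⟩ := hb
      simp only [Function.comp]
      have hge : ¬ (ℓ * (c + j) + i < cs.length) := fun hx => by
        have := (hceil (c + j)).mpr hx
        omega
      rw [pvPad, if_pos (by generalize ℓ * (c + j) = p at hge ⊢; omega)]
  · have hmin : min ((i : Nat) : Int) ((cs.length : Nat) : Int) = ((cs.length : Nat) : Int) := by omega
    rw [hmin, if_neg (by omega)]
    simp only [List.range_zero, List.filterMap_nil, List.nil_append, List.length_nil, Nat.sub_zero]
    symm
    rw [List.eq_replicate_iff]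
    refine ⟨by simp, ?_⟩
    intro b hb
    rw [List.mem_map] at hb
    obtain ⟨r, hr, rfl⟩ := hb
    rw [pvPad, if_pos (le_trans (Nat.le_of_not_lt hin) (Nat.le_add_left i (ℓ * r)))]

theorem pv_main : ∀ (ct : String) (length : Int), length ≠ 0 → ColumnCreator ct length = ColumnCreator_alt ct length := by
  intro ct L hL0
  rcases lt_or_gt_of_ne hL0 with hneg | hpos
  · -- negative length: both sides are []
    have h1 : PySem.List.pyRange 0 L 1 = [] := by
      rw [PySem.List.pyRange_one, show (L - 0).toNat = 0 from by omega]
      simp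
    have h2 : PySem.List.pyRange 0 (ct.toList.length : Int) L = [] := by
      rw [PySem.List.pyRange]
      rw [if_neg hL0, if_neg (by omega), if_neg (by omega)]
      simp
    simp [ColumnCreator, ColumnCreator_alt, pvA_core, h1]
  · -- positive length
    lift L to ℕ using hpos.le with ℓ
    have hℓ : 0 < ℓ := by exact_mod_cast hpos
    have hpy1 : PySem.List.pyRange 0 (ℓ : Int) 1 = (List.range ℓ).map (fun k => ((k : Nat) : Int)) := by
      rw [PySem.List.pyRange_one, show ((ℓ : Int) - 0).toNat = ℓ from by omega]
      simp
    have hrows : (PySem.List.pyRange 0 (ct.toList.length : Int) (ℓ : Int)).length = pvR ct.toList ℓ := by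
      rw [pv_pyRange_pos _ _ (by exact_mod_cast hℓ) (by positivity)]
      simp [pvR]
    simp only [ColumnCreator, ColumnCreator_alt]
    rw [pv_A_char ct.toList ℓ hℓ, hrows, hpy1]
    rw [List.map_map, List.map_map]
    apply List.map_congr_left
    intro i _
    simp only [Function.comp]
    rw [pv_B_col ct.toList ℓ hℓ i]

-- ===== VERDICT (by name: the statement is the Claim_ definition above) =====
theorem ColumnCreator_spec : Claim_equal_ColumnCreator := by
  intro ct length _ hpre
  exact pv_main ct length hpre
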